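-- pv_equiv track=rewrite | github.com/mramirezraul71/atlas-core | modules/humanoid/orchestrator/langflow_orchestrator.py | _select_flow_for_goal
-- ===== SOURCE A (Python) =====
-- def _select_flow_for_goal(goal: str) -> str:
--     """Seleccionar flow apropiado basado en el objetivo."""
--     goal_lower = goal.lower()
--
--     # Heurísticas simples para selección de flow
--     if any(
--         keyword in goal_lower
--         for keyword in ["code", "program", "develop", "implement"]
--     ):
--         return "development_flow"
--     elif any(
--         keyword in goal_lower for keyword in ["analyze", "investigate", "research"]
--     ):
--         return "analysis_flow"
--     elif any(keyword in goal_lower for keyword in ["create", "build", "design"]):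
--         return "creative_flow"
--     elif any(
--         keyword in goal_lower for keyword in ["fix", "repair", "debug", "solve"]
--     ):
--         return "problem_solving_flow"
--     else:
--         return "general_flow"
-- ===== SOURCE B (Python) =====
-- # Inverted index: keyword -> (priority, flow); answer = minimum-priority match.
-- _KEYWORD_FLOW = {
--     "code": (0, "development_flow"),
--     "program": (0, "development_flow"),
--     "develop": (0, "development_flow"),
--     "implement": (0, "development_flow"),
--     "analyze": (1, "analysis_flow"),
--     "investigate": (1, "analysis_flow"),
--     "research": (1, "analysis_flow"),
--     "create": (2, "creative_flow"),
--     "build": (2, "creative_flow"),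
--     "design": (2, "creative_flow"),
--     "fix": (3, "problem_solving_flow"),
--     "repair": (3, "problem_solving_flow"),
--     "debug": (3, "problem_solving_flow"),
--     "solve": (3, "problem_solving_flow"),
-- }
--
-- def _select_flow_for_goal(goal: str) -> str:
--     goal_lower = goal.lower()
--     best_prio, best_flow = 4, "general_flow"
--     for kw, (prio, flow) in _KEYWORD_FLOW.items():
--         if prio < best_prio and kw in goal_lower:
--             best_prio, best_flow = prio, flow
--     return best_flow
-- ===== Notes on version B (the rewrite author's own statement) =====
-- stated objective: alternative
-- what changed: Inverted the data structure into a flat keyword->(priority,flow) index and replaced the first-match if/elif chain of grouped any() tests by a single order-independent minimum-priority fold over all keywords.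
import Mathlib
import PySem

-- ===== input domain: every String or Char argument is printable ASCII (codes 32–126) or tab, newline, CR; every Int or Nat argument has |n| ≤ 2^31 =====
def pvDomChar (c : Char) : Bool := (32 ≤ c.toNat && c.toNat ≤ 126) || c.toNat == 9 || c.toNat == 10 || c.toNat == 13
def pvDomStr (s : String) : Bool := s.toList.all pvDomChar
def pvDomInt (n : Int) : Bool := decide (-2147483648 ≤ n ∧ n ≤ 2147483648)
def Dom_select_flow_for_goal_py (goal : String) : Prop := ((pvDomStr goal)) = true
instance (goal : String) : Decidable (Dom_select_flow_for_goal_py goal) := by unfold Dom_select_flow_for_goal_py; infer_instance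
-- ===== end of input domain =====

-- B replaces A's if/elif chain of grouped any() tests by a minimum-priority reduction over a flat keyword->(priority,flow) index (alternative decomposition; same behaviour).


-- ===== PORT A =====
-- Literal port of A: lowercase once, then the if/elif chain of `any` membership tests.
def select_flow_for_goal_py (goal : String) : String :=
  let goal_lower := PySem.Str.lower goal
  if ["code", "program", "develop", "implement"].any (fun k => PySem.Str.isIn k goal_lower) then
    "development_flow"
  else if ["analyze", "investigate", "research"].any (fun k => PySem.Str.isIn k goal_lower) then
    "analysis_flow"
  else if ["create", "build", "design"].any (fun k => PySem.Str.isIn k goal_lower) then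
    "creative_flow"
  else if ["fix", "repair", "debug", "solve"].any (fun k => PySem.Str.isIn k goal_lower) then
    "problem_solving_flow"
  else
    "general_flow"

-- ===== PORT B =====
-- B: flat keyword -> (priority, flow) index (dict insertion order), folded with a
-- minimum-priority accumulator; no grouping, no any(), no early return.
def pvKeywordFlow : List (String × Nat × String) :=
  [("code", 0, "development_flow"),
   ("program", 0, "development_flow"),
   ("develop", 0, "development_flow"),
   ("implement", 0, "development_flow"),
   ("analyze", 1, "analysis_flow"),
   ("investigate", 1, "analysis_flow"),
   ("research", 1, "analysis_flow"),
   ("create", 2, "creative_flow"),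
   ("build", 2, "creative_flow"),
   ("design", 2, "creative_flow"),
   ("fix", 3, "problem_solving_flow"),
   ("repair", 3, "problem_solving_flow"),
   ("debug", 3, "problem_solving_flow"),
   ("solve", 3, "problem_solving_flow")]

-- loop body of B: keep the entry iff it strictly improves the current best priority and matches
def pvStep (gl : String) (b : Nat × String) (e : String × Nat × String) : Nat × String :=
  if e.2.1 < b.1 ∧ PySem.Str.isIn e.1 gl = true then e.2 else b

def select_flow_for_goal_py_alt (goal : String) : String :=
  let goal_lower := PySem.Str.lower goal
  (pvKeywordFlow.foldl (pvStep goal_lower) (4, "general_flow")).2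

-- ===== PRECONDITION & SPEC =====
def Spec_select_flow_for_goal_py (goal : String) (out : String) : Prop := out = select_flow_for_goal_py_alt goal
instance (goal : String) (out : String) : Decidable (Spec_select_flow_for_goal_py goal out) := by unfold Spec_select_flow_for_goal_py; infer_instance

-- ===== CLAIM (what is proved, stated in full; the proofs are below) =====
def Claim_equal_select_flow_for_goal_py : Prop := ∀ (goal : String), Dom_select_flow_for_goal_py goal → Spec_select_flow_for_goal_py goal (select_flow_for_goal_py goal)

-- ===== LEMMAS AND PROOFS =====

-- Folding B's step over a block of entries that all carry the same (priority, flow)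
-- either improves the accumulator to (p, f) (iff p improves and some keyword matches) or leaves it.
theorem pvFoldl_const_block (gl : String) (p : Nat) (f : String) (ks : List String)
    (b : Nat × String) :
    (ks.map (fun k => (k, p, f))).foldl (pvStep gl) b
      = if p < b.1 ∧ ks.any (fun k => PySem.Str.isIn k gl) then (p, f) else b := by
  induction ks generalizing b with
  | nil => simp
  | cons k ks ih =>
    simp only [List.map_cons, List.foldl_cons, List.any_cons, pvStep]
    by_cases hm : PySem.Str.isIn k gl = true
    · by_cases hp : p < b.1
      · rw [if_pos ⟨hp, hm⟩, ih, if_neg (fun h => Nat.lt_irrefl p h.1),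
            if_pos ⟨hp, by rw [hm, Bool.true_or]⟩]
      · rw [if_neg (fun h => hp h.1), ih, if_neg (fun h => hp h.1), if_neg (fun h => hp h.1)]
    · have hm' : PySem.Str.isIn k gl = false := Bool.not_eq_true _ ▸ hm
      rw [if_neg (fun h => hm h.2), ih]
      simp only [hm', Bool.false_or]

-- ===== VERDICT (by name: the statement is the Claim_ definition above) =====
theorem select_flow_for_goal_py_spec : Claim_equal_select_flow_for_goal_py := by
  intro goal _
  unfold Spec_select_flow_for_goal_py select_flow_for_goal_py select_flow_for_goal_py_alt
  have htab : pvKeywordFlow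
      = (["code", "program", "develop", "implement"].map (fun k => (k, 0, "development_flow")))
        ++ (["analyze", "investigate", "research"].map (fun k => (k, 1, "analysis_flow")))
        ++ (["create", "build", "design"].map (fun k => (k, 2, "creative_flow")))
        ++ (["fix", "repair", "debug", "solve"].map (fun k => (k, 3, "problem_solving_flow"))) := by
    rfl
  rw [htab]
  simp only [List.foldl_append, pvFoldl_const_block]
  cases h1 : ["code", "program", "develop", "implement"].any
      (fun k => PySem.Str.isIn k (PySem.Str.lower goal)) <;>
  cases h2 : ["analyze", "investigate", "research"].any
      (fun k => PySem.Str.isIn k (PySem.Str.lower goal)) <;>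
  cases h3 : ["create", "build", "design"].any
      (fun k => PySem.Str.isIn k (PySem.Str.lower goal)) <;>
  cases h4 : ["fix", "repair", "debug", "solve"].any
      (fun k => PySem.Str.isIn k (PySem.Str.lower goal)) <;>
  simp [h1, h2, h3, h4]
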